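-- pv_equiv track=rewrite | github.com/THORCollective/threat-hunting-mcp-server | src/intelligence/thor_collective.py | _is_related_industry
-- ===== SOURCE A (Python) =====
-- from typing import Dict, List, Optional
--
-- def _is_related_industry(org_industry: str, hunt_industries: List[str]) -> bool:
--     """Check if industries are related"""
--     industry_groups = {
--         "financial": ["banking", "fintech", "insurance", "payments"],
--         "healthcare": ["hospital", "pharma", "medical", "health"],
--         "technology": ["software", "saas", "tech", "it"],
--         "retail": ["ecommerce", "retail", "shopping"],
--         "government": ["federal", "state", "local", "public sector"],
--     }
--
--     for group, industries in industry_groups.items():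
--         if org_industry in industries:
--             for hunt_ind in hunt_industries:
--                 if hunt_ind in industries:
--                     return True
--
--     return False
-- ===== SOURCE B (Python) =====
-- def _is_related_industry(org_industry, hunt_industries):
--     """Check if industries are related (inverted-index formulation)."""
--     industry_groups = {
--         "financial": ["banking", "fintech", "insurance", "payments"],
--         "healthcare": ["hospital", "pharma", "medical", "health"],
--         "technology": ["software", "saas", "tech", "it"],
--         "retail": ["ecommerce", "retail", "shopping"],
--         "government": ["federal", "state", "local", "public sector"],
--     }
--     index = {}
--     for group, industries in industry_groups.items():
--         for ind in industries:
--             index[ind] = group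
--     group = index.get(org_industry)
--     if group is None:
--         return False
--     return any(index.get(h) == group for h in hunt_industries)
-- ===== Notes on version B (the rewrite author's own statement) =====
-- stated objective: idiomatic
-- what changed: Replaces the nested scan over all groups with a one-time inverted index (industry -> group name) followed by a single flat any() pass over hunt_industries.
import Mathlib
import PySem

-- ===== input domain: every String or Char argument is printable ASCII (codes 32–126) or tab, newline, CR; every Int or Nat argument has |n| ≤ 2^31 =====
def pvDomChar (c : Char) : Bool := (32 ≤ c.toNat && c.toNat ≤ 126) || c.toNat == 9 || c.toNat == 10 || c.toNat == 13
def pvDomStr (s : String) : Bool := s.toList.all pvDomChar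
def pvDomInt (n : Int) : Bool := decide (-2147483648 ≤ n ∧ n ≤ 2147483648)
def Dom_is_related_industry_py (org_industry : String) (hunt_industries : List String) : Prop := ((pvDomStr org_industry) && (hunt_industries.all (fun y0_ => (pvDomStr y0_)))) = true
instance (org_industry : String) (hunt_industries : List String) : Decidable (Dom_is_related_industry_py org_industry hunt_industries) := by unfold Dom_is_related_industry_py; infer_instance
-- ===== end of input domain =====

-- B replaces A's nested scan over all groups by a one-time inverted index (industry -> group) and a single flat pass (idiomatic restructuring; same results).

-- ===== PORT A =====
-- the fixed table, as A writes it (dict iterated in insertion order)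
def pvGroups : List (String × List String) :=
  [ ("financial",  ["banking", "fintech", "insurance", "payments"]),
    ("healthcare", ["hospital", "pharma", "medical", "health"]),
    ("technology", ["software", "saas", "tech", "it"]),
    ("retail",     ["ecommerce", "retail", "shopping"]),
    ("government", ["federal", "state", "local", "public sector"]) ]

-- inner loop of A: 'for hunt_ind in hunt_industries: if hunt_ind in industries: return True'
def pvInnerA (industries : List String) : List String → Bool
  | [] => false
  | h :: rest => if industries.contains h then true else pvInnerA industries rest

-- outer loop of A over the dict items
def pvOuterA (org_industry : String) (hunt_industries : List String) : List (String × List String) → Bool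
  | [] => false
  | (_, industries) :: rest =>
      if industries.contains org_industry then
        (if pvInnerA industries hunt_industries then true
         else pvOuterA org_industry hunt_industries rest)
      else pvOuterA org_industry hunt_industries rest

def is_related_industry_py (org_industry : String) (hunt_industries : List String) : Bool :=
  pvOuterA org_industry hunt_industries pvGroups

-- ===== PORT B =====
-- 'index = {}; for group, industries in industry_groups.items(): for ind in industries: index[ind] = group'
def pvIndexB : PySem.Dict String String :=
  pvGroups.foldl
    (fun d gi => gi.2.foldl (fun d ind => d.insert ind gi.1) d)
    PySem.Dict.empty

def is_related_industry_py_alt (org_industry : String) (hunt_industries : List String) : Bool :=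
  match pvIndexB.get? org_industry with
  | none => false
  | some group => hunt_industries.any (fun h => pvIndexB.get? h == some group)

-- ===== PRECONDITION & SPEC =====
def Spec_is_related_industry_py (org_industry : String) (hunt_industries : List String) (out : Bool) : Prop := out = is_related_industry_py_alt org_industry hunt_industries
instance (org_industry : String) (hunt_industries : List String) (out : Bool) : Decidable (Spec_is_related_industry_py org_industry hunt_industries out) := by unfold Spec_is_related_industry_py; infer_instance

-- ===== CLAIM (what is proved, stated in full; the proofs are below) =====
def Claim_equal_is_related_industry_py : Prop := ∀ (org_industry : String) (hunt_industries : List String), Dom_is_related_industry_py org_industry hunt_industries → Spec_is_related_industry_py org_industry hunt_industries (is_related_industry_py org_industry hunt_industries)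

-- ===== LEMMAS AND PROOFS =====

-- the built index, written out
lemma pvIndexB_eq : pvIndexB = PySem.Dict.mk
    [ ("banking","financial"),("fintech","financial"),("insurance","financial"),("payments","financial"),
      ("hospital","healthcare"),("pharma","healthcare"),("medical","healthcare"),("health","healthcare"),
      ("software","technology"),("saas","technology"),("tech","technology"),("it","technology"),
      ("ecommerce","retail"),("retail","retail"),("shopping","retail"),
      ("federal","government"),("state","government"),("local","government"),("public sector","government") ] := by
  rfl

-- lookup in the index, characterised as an if-chain over the five industry lists
lemma pvIndexB_get (h : String) :
    pvIndexB.get? h =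
      if (["banking","fintech","insurance","payments"] : List String).contains h then some "financial"
      else if (["hospital","pharma","medical","health"] : List String).contains h then some "healthcare"
      else if (["software","saas","tech","it"] : List String).contains h then some "technology"
      else if (["ecommerce","retail","shopping"] : List String).contains h then some "retail"
      else if (["federal","state","local","public sector"] : List String).contains h then some "government"
      else none := by
  rw [pvIndexB_eq]
  by_cases c1 : (["banking","fintech","insurance","payments"] : List String).contains h
  · rcases (by simpa [List.contains_cons, beq_iff_eq] using c1 : h = "banking" ∨ h = "fintech" ∨ h = "insurance" ∨ h = "payments") with rfl|rfl|rfl|rfl <;> rfl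
  by_cases c2 : (["hospital","pharma","medical","health"] : List String).contains h
  · rcases (by simpa [List.contains_cons, beq_iff_eq] using c2 : h = "hospital" ∨ h = "pharma" ∨ h = "medical" ∨ h = "health") with rfl|rfl|rfl|rfl <;> rfl
  by_cases c3 : (["software","saas","tech","it"] : List String).contains h
  · rcases (by simpa [List.contains_cons, beq_iff_eq] using c3 : h = "software" ∨ h = "saas" ∨ h = "tech" ∨ h = "it") with rfl|rfl|rfl|rfl <;> rfl
  by_cases c4 : (["ecommerce","retail","shopping"] : List String).contains h
  · rcases (by simpa [List.contains_cons, beq_iff_eq] using c4 : h = "ecommerce" ∨ h = "retail" ∨ h = "shopping") with rfl|rfl|rfl <;> rfl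
  by_cases c5 : (["federal","state","local","public sector"] : List String).contains h
  · rcases (by simpa [List.contains_cons, beq_iff_eq] using c5 : h = "federal" ∨ h = "state" ∨ h = "local" ∨ h = "public sector") with rfl|rfl|rfl|rfl <;> rfl
  · simp only [c1, c2, c3, c4, c5, if_false, Bool.false_eq_true]
    simp only [List.contains_cons, List.contains_nil, Bool.or_eq_true, beq_iff_eq, not_or] at c1 c2 c3 c4 c5
    simp only [PySem.Dict.get?, Option.map_eq_none_iff, List.find?_eq_none, List.mem_cons,
      List.not_mem_nil, or_false]
    rintro p (rfl|rfl|rfl|rfl|rfl|rfl|rfl|rfl|rfl|rfl|rfl|rfl|rfl|rfl|rfl|rfl|rfl|rfl|rfl) <;>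
      (simp [beq_iff_eq]; intro e; subst e; simp_all)

lemma pvPt_financial (h : String) :
    (pvIndexB.get? h == some "financial") = (["banking","fintech","insurance","payments"] : List String).contains h := by
  rw [pvIndexB_get h]
  by_cases d1 : (["banking","fintech","insurance","payments"] : List String).contains h
  · rcases (by simpa [List.contains_cons, beq_iff_eq] using d1 : h = "banking" ∨ h = "fintech" ∨ h = "insurance" ∨ h = "payments") with rfl|rfl|rfl|rfl <;> decide
  by_cases d2 : (["hospital","pharma","medical","health"] : List String).contains h
  · rcases (by simpa [List.contains_cons, beq_iff_eq] using d2 : h = "hospital" ∨ h = "pharma" ∨ h = "medical" ∨ h = "health") with rfl|rfl|rfl|rfl <;> decide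
  by_cases d3 : (["software","saas","tech","it"] : List String).contains h
  · rcases (by simpa [List.contains_cons, beq_iff_eq] using d3 : h = "software" ∨ h = "saas" ∨ h = "tech" ∨ h = "it") with rfl|rfl|rfl|rfl <;> decide
  by_cases d4 : (["ecommerce","retail","shopping"] : List String).contains h
  · rcases (by simpa [List.contains_cons, beq_iff_eq] using d4 : h = "ecommerce" ∨ h = "retail" ∨ h = "shopping") with rfl|rfl|rfl <;> decide
  by_cases d5 : (["federal","state","local","public sector"] : List String).contains h
  · rcases (by simpa [List.contains_cons, beq_iff_eq] using d5 : h = "federal" ∨ h = "state" ∨ h = "local" ∨ h = "public sector") with rfl|rfl|rfl|rfl <;> decide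
  · simp only [List.contains_cons, List.contains_nil, Bool.or_eq_true, beq_iff_eq, not_or] at d1 d2 d3 d4 d5
    simp [d1, d2, d3, d4, d5]

lemma pvPt_healthcare (h : String) :
    (pvIndexB.get? h == some "healthcare") = (["hospital","pharma","medical","health"] : List String).contains h := by
  rw [pvIndexB_get h]
  by_cases d1 : (["banking","fintech","insurance","payments"] : List String).contains h
  · rcases (by simpa [List.contains_cons, beq_iff_eq] using d1 : h = "banking" ∨ h = "fintech" ∨ h = "insurance" ∨ h = "payments") with rfl|rfl|rfl|rfl <;> decide
  by_cases d2 : (["hospital","pharma","medical","health"] : List String).contains h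
  · rcases (by simpa [List.contains_cons, beq_iff_eq] using d2 : h = "hospital" ∨ h = "pharma" ∨ h = "medical" ∨ h = "health") with rfl|rfl|rfl|rfl <;> decide
  by_cases d3 : (["software","saas","tech","it"] : List String).contains h
  · rcases (by simpa [List.contains_cons, beq_iff_eq] using d3 : h = "software" ∨ h = "saas" ∨ h = "tech" ∨ h = "it") with rfl|rfl|rfl|rfl <;> decide
  by_cases d4 : (["ecommerce","retail","shopping"] : List String).contains h
  · rcases (by simpa [List.contains_cons, beq_iff_eq] using d4 : h = "ecommerce" ∨ h = "retail" ∨ h = "shopping") with rfl|rfl|rfl <;> decide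
  by_cases d5 : (["federal","state","local","public sector"] : List String).contains h
  · rcases (by simpa [List.contains_cons, beq_iff_eq] using d5 : h = "federal" ∨ h = "state" ∨ h = "local" ∨ h = "public sector") with rfl|rfl|rfl|rfl <;> decide
  · simp only [List.contains_cons, List.contains_nil, Bool.or_eq_true, beq_iff_eq, not_or] at d1 d2 d3 d4 d5
    simp [d1, d2, d3, d4, d5]

lemma pvPt_technology (h : String) :
    (pvIndexB.get? h == some "technology") = (["software","saas","tech","it"] : List String).contains h := by
  rw [pvIndexB_get h]
  by_cases d1 : (["banking","fintech","insurance","payments"] : List String).contains h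
  · rcases (by simpa [List.contains_cons, beq_iff_eq] using d1 : h = "banking" ∨ h = "fintech" ∨ h = "insurance" ∨ h = "payments") with rfl|rfl|rfl|rfl <;> decide
  by_cases d2 : (["hospital","pharma","medical","health"] : List String).contains h
  · rcases (by simpa [List.contains_cons, beq_iff_eq] using d2 : h = "hospital" ∨ h = "pharma" ∨ h = "medical" ∨ h = "health") with rfl|rfl|rfl|rfl <;> decide
  by_cases d3 : (["software","saas","tech","it"] : List String).contains h
  · rcases (by simpa [List.contains_cons, beq_iff_eq] using d3 : h = "software" ∨ h = "saas" ∨ h = "tech" ∨ h = "it") with rfl|rfl|rfl|rfl <;> decide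
  by_cases d4 : (["ecommerce","retail","shopping"] : List String).contains h
  · rcases (by simpa [List.contains_cons, beq_iff_eq] using d4 : h = "ecommerce" ∨ h = "retail" ∨ h = "shopping") with rfl|rfl|rfl <;> decide
  by_cases d5 : (["federal","state","local","public sector"] : List String).contains h
  · rcases (by simpa [List.contains_cons, beq_iff_eq] using d5 : h = "federal" ∨ h = "state" ∨ h = "local" ∨ h = "public sector") with rfl|rfl|rfl|rfl <;> decide
  · simp only [List.contains_cons, List.contains_nil, Bool.or_eq_true, beq_iff_eq, not_or] at d1 d2 d3 d4 d5
    simp [d1, d2, d3, d4, d5]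

lemma pvPt_retail (h : String) :
    (pvIndexB.get? h == some "retail") = (["ecommerce","retail","shopping"] : List String).contains h := by
  rw [pvIndexB_get h]
  by_cases d1 : (["banking","fintech","insurance","payments"] : List String).contains h
  · rcases (by simpa [List.contains_cons, beq_iff_eq] using d1 : h = "banking" ∨ h = "fintech" ∨ h = "insurance" ∨ h = "payments") with rfl|rfl|rfl|rfl <;> decide
  by_cases d2 : (["hospital","pharma","medical","health"] : List String).contains h
  · rcases (by simpa [List.contains_cons, beq_iff_eq] using d2 : h = "hospital" ∨ h = "pharma" ∨ h = "medical" ∨ h = "health") with rfl|rfl|rfl|rfl <;> decide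
  by_cases d3 : (["software","saas","tech","it"] : List String).contains h
  · rcases (by simpa [List.contains_cons, beq_iff_eq] using d3 : h = "software" ∨ h = "saas" ∨ h = "tech" ∨ h = "it") with rfl|rfl|rfl|rfl <;> decide
  by_cases d4 : (["ecommerce","retail","shopping"] : List String).contains h
  · rcases (by simpa [List.contains_cons, beq_iff_eq] using d4 : h = "ecommerce" ∨ h = "retail" ∨ h = "shopping") with rfl|rfl|rfl <;> decide
  by_cases d5 : (["federal","state","local","public sector"] : List String).contains h
  · rcases (by simpa [List.contains_cons, beq_iff_eq] using d5 : h = "federal" ∨ h = "state" ∨ h = "local" ∨ h = "public sector") with rfl|rfl|rfl|rfl <;> decide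
  · simp only [List.contains_cons, List.contains_nil, Bool.or_eq_true, beq_iff_eq, not_or] at d1 d2 d3 d4 d5
    simp [d1, d2, d3, d4, d5]

lemma pvPt_government (h : String) :
    (pvIndexB.get? h == some "government") = (["federal","state","local","public sector"] : List String).contains h := by
  rw [pvIndexB_get h]
  by_cases d1 : (["banking","fintech","insurance","payments"] : List String).contains h
  · rcases (by simpa [List.contains_cons, beq_iff_eq] using d1 : h = "banking" ∨ h = "fintech" ∨ h = "insurance" ∨ h = "payments") with rfl|rfl|rfl|rfl <;> decide
  by_cases d2 : (["hospital","pharma","medical","health"] : List String).contains h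
  · rcases (by simpa [List.contains_cons, beq_iff_eq] using d2 : h = "hospital" ∨ h = "pharma" ∨ h = "medical" ∨ h = "health") with rfl|rfl|rfl|rfl <;> decide
  by_cases d3 : (["software","saas","tech","it"] : List String).contains h
  · rcases (by simpa [List.contains_cons, beq_iff_eq] using d3 : h = "software" ∨ h = "saas" ∨ h = "tech" ∨ h = "it") with rfl|rfl|rfl|rfl <;> decide
  by_cases d4 : (["ecommerce","retail","shopping"] : List String).contains h
  · rcases (by simpa [List.contains_cons, beq_iff_eq] using d4 : h = "ecommerce" ∨ h = "retail" ∨ h = "shopping") with rfl|rfl|rfl <;> decide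
  by_cases d5 : (["federal","state","local","public sector"] : List String).contains h
  · rcases (by simpa [List.contains_cons, beq_iff_eq] using d5 : h = "federal" ∨ h = "state" ∨ h = "local" ∨ h = "public sector") with rfl|rfl|rfl|rfl <;> decide
  · simp only [List.contains_cons, List.contains_nil, Bool.or_eq_true, beq_iff_eq, not_or] at d1 d2 d3 d4 d5
    simp [d1, d2, d3, d4, d5]

lemma pvInnerA_any (industries hunts : List String) :
    pvInnerA industries hunts = hunts.any industries.contains := by
  induction hunts with
  | nil => rfl
  | cons h rest ih =>
    simp only [pvInnerA, List.any_cons, ih]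
    cases hc : industries.contains h <;> simp_all

lemma pvAny_congr (g : String) (inds : List String) (hunts : List String)
    (hg : ∀ h : String, (pvIndexB.get? h == some g) = inds.contains h) :
    hunts.any inds.contains = hunts.any (fun h => pvIndexB.get? h == some g) := by
  induction hunts with
  | nil => rfl
  | cons h rest ih => simp only [List.any_cons, ih, hg h]

lemma pvIfTT (b : Bool) : (if b = true then true else false) = b := by cases b <;> simp

-- ===== VERDICT (by name: the statement is the Claim_ definition above) =====
theorem is_related_industry_py_spec : Claim_equal_is_related_industry_py := by
  intro org hunts _
  unfold Spec_is_related_industry_py is_related_industry_py is_related_industry_py_alt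
  rw [pvIndexB_get org]
  by_cases c1 : (["banking","fintech","insurance","payments"] : List String).contains org
  · rcases (by simpa [List.contains_cons, beq_iff_eq] using c1 : org = "banking" ∨ org = "fintech" ∨ org = "insurance" ∨ org = "payments") with rfl|rfl|rfl|rfl <;>
      · show (if pvInnerA (["banking","fintech","insurance","payments"] : List String) hunts = true then true else false) =
            hunts.any (fun h => pvIndexB.get? h == some "financial")
        rw [pvInnerA_any, pvIfTT]
        exact pvAny_congr "financial" _ hunts pvPt_financial
  by_cases c2 : (["hospital","pharma","medical","health"] : List String).contains org
  · rcases (by simpa [List.contains_cons, beq_iff_eq] using c2 : org = "hospital" ∨ org = "pharma" ∨ org = "medical" ∨ org = "health") with rfl|rfl|rfl|rfl <;>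
      · show (if pvInnerA (["hospital","pharma","medical","health"] : List String) hunts = true then true else false) =
            hunts.any (fun h => pvIndexB.get? h == some "healthcare")
        rw [pvInnerA_any, pvIfTT]
        exact pvAny_congr "healthcare" _ hunts pvPt_healthcare
  by_cases c3 : (["software","saas","tech","it"] : List String).contains org
  · rcases (by simpa [List.contains_cons, beq_iff_eq] using c3 : org = "software" ∨ org = "saas" ∨ org = "tech" ∨ org = "it") with rfl|rfl|rfl|rfl <;>
      · show (if pvInnerA (["software","saas","tech","it"] : List String) hunts = true then true else false) =
            hunts.any (fun h => pvIndexB.get? h == some "technology")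
        rw [pvInnerA_any, pvIfTT]
        exact pvAny_congr "technology" _ hunts pvPt_technology
  by_cases c4 : (["ecommerce","retail","shopping"] : List String).contains org
  · rcases (by simpa [List.contains_cons, beq_iff_eq] using c4 : org = "ecommerce" ∨ org = "retail" ∨ org = "shopping") with rfl|rfl|rfl <;>
      · show (if pvInnerA (["ecommerce","retail","shopping"] : List String) hunts = true then true else false) =
            hunts.any (fun h => pvIndexB.get? h == some "retail")
        rw [pvInnerA_any, pvIfTT]
        exact pvAny_congr "retail" _ hunts pvPt_retail
  by_cases c5 : (["federal","state","local","public sector"] : List String).contains org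
  · rcases (by simpa [List.contains_cons, beq_iff_eq] using c5 : org = "federal" ∨ org = "state" ∨ org = "local" ∨ org = "public sector") with rfl|rfl|rfl|rfl <;>
      · show (if pvInnerA (["federal","state","local","public sector"] : List String) hunts = true then true else false) =
            hunts.any (fun h => pvIndexB.get? h == some "government")
        rw [pvInnerA_any, pvIfTT]
        exact pvAny_congr "government" _ hunts pvPt_government
  · simp only [pvGroups, pvOuterA]
    split_ifs
    simp_all
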